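-- pv_equiv track=rewrite | github.com/decoherencemedia/epstein-network | scripts/generate_static_search_pages.py | first_pei_image_name
-- ===== SOURCE A (Python) =====
-- def first_pei_image_name(
--     pei_map: dict[str, set[str]], sorted_ids: tuple[str, ...]
-- ) -> str | None:
--     if not sorted_ids:
--         return None
--     sets = [pei_map.get(pid, set()) for pid in sorted_ids]
--     inter = set.intersection(*sets)
--     return min(inter) if inter else None
-- ===== SOURCE B (Python) =====
-- def first_pei_image_name(pei_map, sorted_ids):
--     if not sorted_ids:
--         return None
--     rest = [pei_map.get(pid, set()) for pid in sorted_ids[1:]]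
--     for x in sorted(pei_map.get(sorted_ids[0], set())):
--         if all(x in s for s in rest):
--             return x
--     return None
-- ===== Notes on version B (the rewrite author's own statement) =====
-- stated objective: alternative
-- what changed: Instead of materialising the full intersection of all sets and then taking min, B scans the first id's set in sorted order and returns the first candidate present in every other set, short-circuiting at the answer.
import Mathlib
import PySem

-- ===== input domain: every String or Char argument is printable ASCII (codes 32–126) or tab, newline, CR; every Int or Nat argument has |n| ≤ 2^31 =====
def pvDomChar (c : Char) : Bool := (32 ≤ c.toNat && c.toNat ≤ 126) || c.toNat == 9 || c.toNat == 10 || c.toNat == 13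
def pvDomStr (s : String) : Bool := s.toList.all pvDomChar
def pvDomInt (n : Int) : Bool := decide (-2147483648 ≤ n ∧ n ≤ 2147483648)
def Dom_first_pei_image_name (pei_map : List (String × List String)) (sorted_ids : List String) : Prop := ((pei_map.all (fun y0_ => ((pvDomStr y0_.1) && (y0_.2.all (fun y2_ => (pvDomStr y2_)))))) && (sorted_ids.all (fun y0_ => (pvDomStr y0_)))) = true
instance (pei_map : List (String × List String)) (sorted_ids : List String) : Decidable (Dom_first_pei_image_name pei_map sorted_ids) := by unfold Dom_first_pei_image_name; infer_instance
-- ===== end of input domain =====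

-- B replaces "build the full intersection, then take min" by an ordered short-circuiting
-- scan of the first id's set; equal return value, no side effects (objective: alternative).

-- ===== PORT A =====
-- A: guard on empty ids, build the list of sets, intersect them all, return min or None.
def first_pei_image_name (pei_map : List (String × List String)) (sorted_ids : List String) : Option String :=
  if sorted_ids = [] then none
  else
    let sets := sorted_ids.map (fun pid => ((PySem.Dict.mk pei_map).get? pid).getD PySem.Set.empty)
    let inter :=
      match sets with
      | [] => PySem.Set.empty   -- unreachable: sorted_ids ≠ []
      | s :: ss => ss.foldl PySem.Set.inter s
    if inter = [] then none else PySem.List.min? inter (fun x => x)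

-- ===== PORT B =====
-- B: first element of sorted(first set) contained in every remaining set.
def first_pei_image_name_alt (pei_map : List (String × List String)) (sorted_ids : List String) : Option String :=
  match sorted_ids with
  | [] => none
  | pid0 :: restIds =>
    let rest := restIds.map (fun pid => ((PySem.Dict.mk pei_map).get? pid).getD PySem.Set.empty)
    (PySem.List.sorted (((PySem.Dict.mk pei_map).get? pid0).getD PySem.Set.empty) (fun x => x)).find?
      (fun x => rest.all (fun s => PySem.Set.contains s x))

-- ===== PRECONDITION & SPEC =====
def Spec_first_pei_image_name (pei_map : List (String × List String)) (sorted_ids : List String) (out : Option String) : Prop := out = first_pei_image_name_alt pei_map sorted_ids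
instance (pei_map : List (String × List String)) (sorted_ids : List String) (out : Option String) : Decidable (Spec_first_pei_image_name pei_map sorted_ids out) := by unfold Spec_first_pei_image_name; infer_instance

-- ===== CLAIM (what is proved, stated in full; the proofs are below) =====
def Claim_equal_first_pei_image_name : Prop := ∀ (pei_map : List (String × List String)) (sorted_ids : List String), Dom_first_pei_image_name pei_map sorted_ids → Spec_first_pei_image_name pei_map sorted_ids (first_pei_image_name pei_map sorted_ids)

-- ===== LEMMAS AND PROOFS =====

-- Folding set-intersection is filtering the first operand by membership in all the rest.
theorem foldl_inter_eq_filter {α : Type} [BEq α] (rest : List (PySem.Set α)) (s : PySem.Set α) :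
    rest.foldl PySem.Set.inter s = s.filter (fun x => rest.all (fun t => PySem.Set.contains t x)) := by
  induction rest generalizing s with
  | nil => simp
  | cons t rest ih =>
    simp only [List.foldl_cons, ih, PySem.Set.inter, List.filter_filter]
    congr 1
    funext x
    simp [Bool.and_comm]

-- On a ≤-sorted list, find? returns a lower bound of the satisfying elements.
theorem find?_sorted_isMin {α : Type} [LinearOrder α] (l : List α) (p : α → Bool) (m : α)
    (hs : l.Pairwise (· ≤ ·)) (h : l.find? p = some m) : ∀ y ∈ l, p y → m ≤ y := by
  induction l with
  | nil => simp at h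
  | cons a t ih =>
    rcases List.pairwise_cons.mp hs with ⟨ha, ht⟩
    by_cases hp : p a
    · rw [List.find?_cons_of_pos hp] at h
      cases h
      intro y hy _
      rcases List.mem_cons.mp hy with rfl | hy'
      · exact le_refl _
      · exact ha y hy'
    · rw [List.find?_cons_of_neg (by simpa using hp)] at h
      intro y hy hpy
      rcases List.mem_cons.mp hy with rfl | hy'
      · exact absurd hpy hp
      · exact ih ht h y hy' hpy

-- min of the filtered list equals the first satisfying element of the sorted list.
theorem min?_filter_eq_find?_sorted (xs : List String) (p : String → Bool)
    (hne : xs.filter p ≠ []) :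
    PySem.List.min? (xs.filter p) (fun x => x)
      = (PySem.List.sorted xs (fun x => x)).find? p := by
  obtain ⟨m, hm⟩ : ∃ m, PySem.List.min? (xs.filter p) (fun x => x) = some m := by
    cases h : PySem.List.min? (xs.filter p) (fun x => x) with
    | none => exact absurd ((PySem.List.min?_eq_none_iff _ _).mp h) hne
    | some m => exact ⟨m, rfl⟩
  have hmmem := PySem.List.min?_mem hm
  have hmxs : m ∈ xs := (List.mem_filter.mp hmmem).1
  have hpm : p m := (List.mem_filter.mp hmmem).2
  obtain ⟨n, hn⟩ : ∃ n, (PySem.List.sorted xs (fun x => x)).find? p = some n := by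
    cases h : (PySem.List.sorted xs (fun x => x)).find? p with
    | none =>
      have := List.find?_eq_none.mp h m ((PySem.List.mem_sorted _ _ _ _).mpr hmxs)
      exact absurd hpm this
    | some n => exact ⟨n, rfl⟩
  have hnmem : n ∈ xs := (PySem.List.mem_sorted _ _ _ _).mp (List.mem_of_find?_eq_some hn)
  have hpn : p n := List.find?_some hn
  have h1 : m ≤ n := PySem.List.min?_isMin hm n (List.mem_filter.mpr ⟨hnmem, hpn⟩)
  have h2 : n ≤ m := find?_sorted_isMin _ p n (PySem.List.sorted_pairwise xs (fun x => x))
      hn m ((PySem.List.mem_sorted _ _ _ _).mpr hmxs) hpm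
  rw [hm, hn, le_antisymm h1 h2]

-- ===== VERDICT (by name: the statement is the Claim_ definition above) =====
theorem first_pei_image_name_spec : Claim_equal_first_pei_image_name := by
  unfold Claim_equal_first_pei_image_name
  intro pei_map sorted_ids _
  unfold Spec_first_pei_image_name first_pei_image_name first_pei_image_name_alt
  cases sorted_ids with
  | nil => simp
  | cons pid0 restIds =>
    simp only [List.map_cons, if_neg (List.cons_ne_nil pid0 restIds)]
    set first := ((PySem.Dict.mk pei_map).get? pid0).getD PySem.Set.empty with hfirst
    set rest := restIds.map (fun pid => ((PySem.Dict.mk pei_map).get? pid).getD PySem.Set.empty) with hrest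
    rw [foldl_inter_eq_filter rest first]
    by_cases h : first.filter (fun x => rest.all (fun t => PySem.Set.contains t x)) = []
    · rw [if_pos h]
      have : ∀ x ∈ PySem.List.sorted first (fun x => x), ¬ (rest.all (fun s => PySem.Set.contains s x)) := by
        intro x hx hall
        have hxf : x ∈ first := (PySem.List.mem_sorted _ _ _ _).mp hx
        have : x ∈ first.filter (fun x => rest.all (fun t => PySem.Set.contains t x)) :=
          List.mem_filter.mpr ⟨hxf, hall⟩
        rw [h] at this
        simp at this
      rw [List.find?_eq_none.mpr (by intro x hx; simpa using this x hx)]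
    · rw [if_neg h]
      exact min?_filter_eq_find?_sorted first _ h
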